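-- pv_equiv track=rewrite | github.com/raeez/chiral-bar-cobar | compute/lib/virasoro_c13_test.py | verify_tau_squared_multiplicativity
-- ===== SOURCE A (Python) =====
-- import math
--
-- def ramanujan_tau_table(nmax):
--     """Compute tau(1), ..., tau(nmax) all at once (efficient batch)."""
--     if nmax < 1:
--         return []
--     # Compute coefficients of prod_{j=1}^{nmax} (1-q^j)^{24} up to q^{nmax}
--     N = nmax + 1
--     coeffs = [0] * N
--     coeffs[0] = 1
--
--     for j in range(1, nmax + 1):
--         binom_coeffs = []
--         for k in range(25):
--             binom_coeffs.append(math.comb(24, k) * ((-1) ** k))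
--
--         for m in range(N - 1, -1, -1):
--             if coeffs[m] == 0:
--                 continue
--             for k in range(1, 25):
--                 target = m + k * j
--                 if target >= N:
--                     break
--                 coeffs[target] += coeffs[m] * binom_coeffs[k]
--
--     # tau(n) = coeffs[n-1] in prod, but Delta = q * prod, so tau(n) = coeffs[n-1]
--     # Actually: Delta = q * prod(1-q^n)^{24} = sum tau(n) q^n
--     # So coefficient of q^n in Delta = tau(n) = coefficient of q^{n-1} in prod.
--     # But we computed prod up to q^{nmax}, so tau(n) = coeffs[n-1] for n=1..nmax+1
--     # Wait: we need coeffs[0..nmax-1] for tau(1..nmax).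
--     return [coeffs[n - 1] for n in range(1, nmax + 1)]
--
-- def verify_tau_squared_multiplicativity(nmax=20):
--     r"""Verify |tau(mn)|^2 = |tau(m)|^2 * |tau(n)|^2 for gcd(m,n)=1.
--
--     This is the multiplicativity needed for the Euler product of the
--     Dirichlet series D(s) = sum |tau(n)|^2 n^{-s}.
--     """
--     tau = ramanujan_tau_table(nmax * nmax)
--     results = []
--     for m in range(1, nmax + 1):
--         for n in range(1, nmax + 1):
--             if math.gcd(m, n) == 1 and m * n <= len(tau):
--                 tau_m_sq = tau[m - 1] ** 2
--                 tau_n_sq = tau[n - 1] ** 2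
--                 tau_mn_sq = tau[m * n - 1] ** 2
--                 product = tau_m_sq * tau_n_sq
--                 passes = (tau_mn_sq == product)
--                 results.append((m, n, product, tau_mn_sq, passes))
--     return results
-- ===== SOURCE B (Python) =====
-- import math
--
-- def _tmul(a, b):
--     """Truncated product of two coefficient lists of equal length N (mod q^N)."""
--     N = len(a)
--     return [sum(a[i] * b[t - i] for i in range(t + 1)) for t in range(N)]
--
-- def _tau_table(tablemax):
--     """tau(1..tablemax) via eta = prod(1-q^j) built with two-term factors, then eta^24 by binary exponentiation."""
--     if tablemax < 1:
--         return []
--     N = tablemax + 1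
--     eta = [1] + [0] * (N - 1)
--     for j in range(1, N):
--         eta = [eta[t] - (eta[t - j] if t >= j else 0) for t in range(N)]
--     e2 = _tmul(eta, eta)
--     e4 = _tmul(e2, e2)
--     e8 = _tmul(e4, e4)
--     e16 = _tmul(e8, e8)
--     e24 = _tmul(e16, e8)
--     return e24[:tablemax]
--
-- def verify_tau_squared_multiplicativity(nmax=20):
--     tau = _tau_table(nmax * nmax)
--     return [
--         (m, n, tau[m - 1] ** 2 * tau[n - 1] ** 2, tau[m * n - 1] ** 2,
--          tau[m * n - 1] ** 2 == tau[m - 1] ** 2 * tau[n - 1] ** 2)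
--         for m in range(1, nmax + 1)
--         for n in range(1, nmax + 1)
--         if math.gcd(m, n) == 1 and m * n <= len(tau)
--     ]
-- ===== Notes on version B (the rewrite author's own statement) =====
-- stated objective: faster
-- what changed: B builds the tau table from eta = prod(1-q^j) using two-term factors and then raises it to the 24th power by binary exponentiation (5 truncated convolutions) instead of A's in-place multiplication by the 25-term binomial expansion of (1-q^j)^24 for every j, and emits the coprime-pair results as a single comprehension instead of nested accumulator loops.
import Mathlib
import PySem

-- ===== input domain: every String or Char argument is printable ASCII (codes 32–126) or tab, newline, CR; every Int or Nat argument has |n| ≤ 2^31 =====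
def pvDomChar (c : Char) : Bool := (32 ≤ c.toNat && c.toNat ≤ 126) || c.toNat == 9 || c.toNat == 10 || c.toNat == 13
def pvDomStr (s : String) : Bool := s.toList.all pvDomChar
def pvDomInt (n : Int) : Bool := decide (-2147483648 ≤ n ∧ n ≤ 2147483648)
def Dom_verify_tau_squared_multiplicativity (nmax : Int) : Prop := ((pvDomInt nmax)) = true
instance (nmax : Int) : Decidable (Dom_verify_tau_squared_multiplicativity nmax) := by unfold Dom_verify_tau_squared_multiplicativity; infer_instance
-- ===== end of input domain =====

-- B re-implements the tau table: eta = prod (1-q^j) via two-term factors, then eta^24 by binary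
-- exponentiation (5 truncated convolutions) instead of A's 25-term multiply for every j; measurably
-- faster by a constant factor, and the pair-listing loop becomes a flatMap/filter comprehension.

-- ===== PORT A =====
-- inner `for k in range(1, 25)` loop with its `break` (literal transliteration)
def pvA_kloop (b : List Int) (j m N : Nat) (k : Nat) (c : List Int) : List Int :=
  if _h : k < 25 then
    if N ≤ m + k * j then c
    else pvA_kloop b j m N (k+1)
      (c.set (m + k * j) (c.getD (m + k * j) 0 + c.getD m 0 * b.getD k 0))
  else c
  termination_by 25 - k

-- body of A's `for j in range(1, nmax+1)` loop: rebuild binom_coeffs, then the descending m loop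
def pvA_jstep (N : Nat) (j : Nat) (coeffs : List Int) : List Int :=
  let b := (List.range 25).foldl (fun acc k => acc ++ [((Nat.choose 24 k : Int)) * (-1)^k]) []
  (List.range N).reverse.foldl
    (fun c m => if c.getD m 0 = 0 then c else pvA_kloop b j m N 1 c) coeffs

-- ramanujan_tau_table
def pvA_tau (nmax : Int) : List Int :=
  if nmax < 1 then []
  else
    let N : Nat := nmax.toNat + 1
    let coeffs := (List.range' 1 nmax.toNat).foldl (fun coeffs j => pvA_jstep N j coeffs)
      ((List.replicate N (0:Int)).set 0 1)
    (List.range' 1 nmax.toNat).map (fun n => coeffs.getD (n-1) 0)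

def verify_tau_squared_multiplicativity (nmax : Int) : List (Int × Int × Int × Int × Bool) :=
  let tau := pvA_tau (nmax * nmax)
  (PySem.List.pyRange 1 (nmax+1) 1).foldl (fun results m =>
    (PySem.List.pyRange 1 (nmax+1) 1).foldl (fun results n =>
      if Int.gcd m n == 1 && decide (m * n ≤ (tau.length : Int)) then
        let tau_m_sq := (tau.getD (m-1).toNat 0) ^ 2
        let tau_n_sq := (tau.getD (n-1).toNat 0) ^ 2
        let tau_mn_sq := (tau.getD (m*n-1).toNat 0) ^ 2
        let product := tau_m_sq * tau_n_sq
        results ++ [(m, n, product, tau_mn_sq, tau_mn_sq == product)]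
      else results) results) []

-- ===== PORT B =====
-- truncated product of two equal-length coefficient lists (mod q^N)
def pvB_tmul (a b : List Int) : List Int :=
  (List.range a.length).map
    (fun t => ((List.range (t+1)).map (fun i => a.getD i 0 * b.getD (t-i) 0)).sum)

-- one multiplication of eta by the two-term factor (1 - q^j)
def pvB_etastep (N j : Nat) (e : List Int) : List Int :=
  (List.range N).map (fun t => e.getD t 0 - if j ≤ t then e.getD (t - j) 0 else 0)

-- tau via eta^24 by binary exponentiation
def pvB_tau (tablemax : Int) : List Int :=
  if tablemax < 1 then []
  else
    let N : Nat := tablemax.toNat + 1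
    let eta := (List.range' 1 (N-1)).foldl (fun e j => pvB_etastep N j e)
      ((1:Int) :: List.replicate (N-1) 0)
    let e2 := pvB_tmul eta eta
    let e4 := pvB_tmul e2 e2
    let e8 := pvB_tmul e4 e4
    let e16 := pvB_tmul e8 e8
    let e24 := pvB_tmul e16 e8
    e24.take tablemax.toNat

def verify_tau_squared_multiplicativity_alt (nmax : Int) : List (Int × Int × Int × Int × Bool) :=
  let tau := pvB_tau (nmax * nmax)
  (PySem.List.pyRange 1 (nmax+1) 1).flatMap (fun m =>
    ((PySem.List.pyRange 1 (nmax+1) 1).filter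
        (fun n => Int.gcd m n == 1 && decide (m * n ≤ (tau.length : Int)))).map
      (fun n => (m, n, (tau.getD (m-1).toNat 0)^2 * (tau.getD (n-1).toNat 0)^2,
                 (tau.getD (m*n-1).toNat 0)^2,
                 (tau.getD (m*n-1).toNat 0)^2 == (tau.getD (m-1).toNat 0)^2 * (tau.getD (n-1).toNat 0)^2)))

-- ===== PRECONDITION & SPEC =====
def Spec_verify_tau_squared_multiplicativity (nmax : Int) (out : List (Int × Int × Int × Int × Bool)) : Prop := out = verify_tau_squared_multiplicativity_alt nmax
instance (nmax : Int) (out : List (Int × Int × Int × Int × Bool)) : Decidable (Spec_verify_tau_squared_multiplicativity nmax out) := by unfold Spec_verify_tau_squared_multiplicativity; infer_instance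

-- ===== CLAIM (what is proved, stated in full; the proofs are below) =====
def Claim_equal_verify_tau_squared_multiplicativity : Prop := ∀ (nmax : Int), Dom_verify_tau_squared_multiplicativity nmax → Spec_verify_tau_squared_multiplicativity nmax (verify_tau_squared_multiplicativity nmax)

-- ===== LEMMAS AND PROOFS =====

-- `c` represents the power series `f` up to (excluding) degree N
def pvRep (c : List Int) (N : Nat) (f : PowerSeries ℤ) : Prop :=
  c.length = N ∧ ∀ t, t < N → c.getD t 0 = PowerSeries.coeff t f

-- k-th coefficient of (1-x)^24
def pvBC (k : Nat) : Int := ((-1)^k * (Nat.choose 24 k : Int))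

-- contributions to coefficient t after A has processed all m ≥ M (for factor j, truncation N)
def pvS (o : List Int) (j N M t : Nat) : Int :=
  ∑ k ∈ Finset.range 25,
    (if 1 ≤ k ∧ M + k * j ≤ t ∧ t < N then o.getD (t - k*j) 0 * pvBC k else 0)

lemma pv_sum_list_range (n : Nat) (f : Nat → Int) :
    ((List.range n).map f).sum = ∑ k ∈ Finset.range n, f k := by
  induction n with
  | zero => simp
  | succ n ih => simp [List.range_succ, Finset.sum_range_succ, ih]

lemma pv_sum_split_first (k : Nat) (hk : k < 25) (P : Nat → Prop) [DecidablePred P] (g : Nat → Int) :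
    (∑ k' ∈ Finset.range 25, if k ≤ k' ∧ P k' then g k' else 0) =
      (if P k then g k else 0) + ∑ k' ∈ Finset.range 25, if k + 1 ≤ k' ∧ P k' then g k' else 0 := by
  have h : ∀ k' ∈ Finset.range 25, (if k ≤ k' ∧ P k' then g k' else 0) =
      (if k' = k then (if P k' then g k' else 0) else 0) +
        (if k + 1 ≤ k' ∧ P k' then g k' else 0) := by
    intro k' _
    rcases eq_or_ne k' k with rfl | hne
    · simp
    · by_cases hp : P k' <;> by_cases hle : k ≤ k' <;> by_cases hle1 : k + 1 ≤ k' <;>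
        simp_all <;> omega
  rw [Finset.sum_congr rfl h, Finset.sum_add_distrib,
    Finset.sum_ite_eq' (Finset.range 25) k (fun k' => if P k' then g k' else 0)]
  simp [Finset.mem_range.mpr hk]

lemma pvA_kloop_getD (b : List Int) (j m N : Nat) (hj : 1 ≤ j) :
    ∀ (fuel k : Nat), 25 - k ≤ fuel → ∀ (c : List Int), 1 ≤ k → c.length = N →
      (pvA_kloop b j m N k c).length = N ∧
      ∀ t : Nat, (pvA_kloop b j m N k c).getD t 0 =
        c.getD t 0 + ∑ k' ∈ Finset.range 25,
          (if k ≤ k' ∧ t = m + k' * j ∧ t < N then c.getD m 0 * b.getD k' 0 else 0) := by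
  intro fuel
  induction fuel with
  | zero =>
    intro k hk c _hk1 hc
    have h25 : ¬ k < 25 := by omega
    rw [pvA_kloop, dif_neg h25]
    refine ⟨hc, fun t => ?_⟩
    rw [Finset.sum_eq_zero, add_zero]
    intro k' hk'
    rw [if_neg]
    rintro ⟨h1, -⟩
    exact absurd (lt_of_le_of_lt h1 (Finset.mem_range.mp hk')) h25
  | succ fuel ih =>
    intro k hk c hk1 hc
    rw [pvA_kloop]
    by_cases h25 : k < 25
    · rw [dif_pos h25]
      by_cases hbig : N ≤ m + k * j
      · rw [if_pos hbig]
        refine ⟨hc, fun t => ?_⟩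
        rw [Finset.sum_eq_zero, add_zero]
        intro k' _hk'
        rw [if_neg]
        rintro ⟨h1, rfl, h3⟩
        have : k * j ≤ k' * j := Nat.mul_le_mul_right _ h1
        omega
      · rw [if_neg hbig]
        have hkj1 : 1 ≤ k * j := Nat.mul_le_mul hk1 hj
        have hne : m + k * j ≠ m := by omega
        set v := c.getD (m + k * j) 0 + c.getD m 0 * b.getD k 0 with hv
        have hlen : (c.set (m + k * j) v).length = N := by simp [hc]
        obtain ⟨L1, L2⟩ := ih (k+1) (by omega) (c.set (m + k * j) v) (by omega) hlen
        refine ⟨L1, fun t => ?_⟩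
        rw [L2 t]
        have hm : (c.set (m + k * j) v).getD m 0 = c.getD m 0 := by
          simp only [List.getD_eq_getElem?_getD, List.getElem?_set, if_neg hne]
        have hget : (c.set (m + k * j) v).getD t 0 =
            c.getD t 0 + (if t = m + k * j ∧ t < N then c.getD m 0 * b.getD k 0 else 0) := by
          by_cases ht : t = m + k * j
          · rw [ht]
            have htl : m + k * j < c.length := by omega
            have e : (c.set (m + k * j) v).getD (m + k * j) 0 = v := by
              simp [List.getD_eq_getElem?_getD, htl]
            rw [e, if_pos ⟨rfl, by omega⟩, hv]
          · have hne' : m + k * j ≠ t := fun h => ht h.symm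
            simp only [List.getD_eq_getElem?_getD, List.getElem?_set, if_neg hne']
            rw [if_neg (fun h => ht h.1), add_zero]
        rw [hget, hm,
          pv_sum_split_first k h25 (fun k' => t = m + k' * j ∧ t < N)
            (fun k' => c.getD m 0 * b.getD k' 0)]
        ring
    · have h25' := h25
      rw [dif_neg h25]
      refine ⟨hc, fun t => ?_⟩
      rw [Finset.sum_eq_zero, add_zero]
      intro k' hk'
      rw [if_neg]
      rintro ⟨h1, -⟩
      exact absurd (lt_of_le_of_lt h1 (Finset.mem_range.mp hk')) h25

lemma pv_C_pow_expand (j : Nat) :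
    ((1 : PowerSeries ℤ) - (PowerSeries.X : PowerSeries ℤ)^j)^24 =
      ∑ k ∈ Finset.range 25,
        PowerSeries.C ((-1)^k * (Nat.choose 24 k : ℤ)) * (PowerSeries.X : PowerSeries ℤ)^(k*j) := by
  have e : (1 : PowerSeries ℤ) - (PowerSeries.X : PowerSeries ℤ)^j
      = -((PowerSeries.X : PowerSeries ℤ)^j) + 1 := by ring
  rw [e, add_pow]
  refine Finset.sum_congr rfl (fun k _hk => ?_)
  rw [neg_pow, one_pow, ← pow_mul, Nat.mul_comm j k]
  simp only [map_mul, map_pow, map_neg, map_one, map_natCast]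
  ring

lemma pv_coeff_mul_factor (f : PowerSeries ℤ) (j t : Nat) :
    PowerSeries.coeff t (f * (1 - (PowerSeries.X : PowerSeries ℤ)^j)^24) =
      ∑ k ∈ Finset.range 25,
        (if k * j ≤ t then PowerSeries.coeff (t - k*j) f * pvBC k else 0) := by
  rw [pv_C_pow_expand, Finset.mul_sum, map_sum]
  refine Finset.sum_congr rfl (fun k _hk => ?_)
  rw [show f * (PowerSeries.C ((-1)^k * (Nat.choose 24 k : ℤ)) * (PowerSeries.X : PowerSeries ℤ)^(k*j))
      = PowerSeries.C ((-1)^k * (Nat.choose 24 k : ℤ)) * (f * (PowerSeries.X : PowerSeries ℤ)^(k*j)) by ring,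
    PowerSeries.coeff_C_mul, PowerSeries.coeff_mul_X_pow']
  split_ifs with h
  · simp [pvBC]; ring
  · simp

lemma pvB_tmul_rep (a b : List Int) (N : Nat) (f g : PowerSeries ℤ)
    (ha : pvRep a N f) (hb : pvRep b N g) : pvRep (pvB_tmul a b) N (f * g) := by
  obtain ⟨hal, hav⟩ := ha
  obtain ⟨hbl, hbv⟩ := hb
  constructor
  · simp [pvB_tmul, hal]
  · intro t ht
    rw [pvB_tmul, hal, PySem.List.getD_map_range _ _ _ _ ht, pv_sum_list_range,
      PowerSeries.coeff_mul, Finset.Nat.sum_antidiagonal_eq_sum_range_succ_mk]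
    refine Finset.sum_congr rfl (fun i hi => ?_)
    have hi' : i < t + 1 := Finset.mem_range.mp hi
    rw [hav i (by omega), hbv (t - i) (by omega)]

lemma pvB_etastep_rep (N j : Nat) (e : List Int) (f : PowerSeries ℤ)
    (he : pvRep e N f) : pvRep (pvB_etastep N j e) N (f * (1 - (PowerSeries.X : PowerSeries ℤ)^j)) := by
  obtain ⟨hel, hev⟩ := he
  constructor
  · simp [pvB_etastep]
  · intro t ht
    rw [pvB_etastep, PySem.List.getD_map_range _ _ _ _ ht, mul_sub, mul_one, map_sub,
      PowerSeries.coeff_mul_X_pow', hev t ht]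
    by_cases hjt : j ≤ t
    · rw [if_pos hjt, if_pos hjt, hev (t - j) (by omega)]
    · rw [if_neg hjt, if_neg hjt]

lemma pvB_init_rep (N : Nat) (hN : 1 ≤ N) : pvRep ((1:Int) :: List.replicate (N-1) 0) N 1 := by
  constructor
  · simp; omega
  · intro t ht
    rw [PowerSeries.coeff_one]
    cases t with
    | zero => simp
    | succ t =>
      simp [List.getD_eq_getElem?_getD, List.getElem?_replicate]
      split <;> rfl

lemma pvA_init_rep (N : Nat) (hN : 1 ≤ N) : pvRep ((List.replicate N (0:Int)).set 0 1) N 1 := by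
  obtain ⟨M, rfl⟩ : ∃ M, N = M + 1 := ⟨N - 1, by omega⟩
  have e : (List.replicate (M+1) (0:Int)).set 0 1 = (1:Int) :: List.replicate M 0 := by
    rw [List.replicate_succ]
    rfl
  rw [e]
  simpa using pvB_init_rep (M+1) (by omega)

lemma pvS_step (o : List Int) (j N M t : Nat) :
    pvS o j N M t = pvS o j N (M+1) t +
      ∑ k' ∈ Finset.range 25,
        (if 1 ≤ k' ∧ t = M + k' * j ∧ t < N then o.getD M 0 * pvBC k' else 0) := by
  unfold pvS
  rw [← Finset.sum_add_distrib]
  refine Finset.sum_congr rfl (fun k _hk => ?_)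
  by_cases h1 : 1 ≤ k
  · by_cases htN : t < N
    · by_cases heq : t = M + k * j
      · have h2 : ¬ (M + 1 + k*j ≤ t) := by omega
        have h3 : t - k*j = M := by omega
        have h4 : M + k*j ≤ t := by omega
        rw [if_pos ⟨h1, h4, htN⟩, if_neg (fun h => h2 h.2.1), if_pos ⟨h1, heq, htN⟩, h3, zero_add]
      · by_cases hle : M + 1 + k*j ≤ t
        · have h4 : M + k*j ≤ t := by omega
          rw [if_pos ⟨h1, h4, htN⟩, if_pos ⟨h1, hle, htN⟩, if_neg (fun h => heq h.2.1), add_zero]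
        · have h4 : ¬ (M + k*j ≤ t) := by omega
          rw [if_neg (fun h => h4 h.2.1), if_neg (fun h => hle h.2.1),
            if_neg (fun h => heq h.2.1), add_zero]
    · simp [htN]
  · simp [h1]

lemma pvA_mfold (b : List Int) (j N : Nat) (hj : 1 ≤ j)
    (hb : ∀ k, k < 25 → b.getD k 0 = pvBC k) (o : List Int) :
    ∀ (M : Nat) (c : List Int), c.length = N →
      (∀ t, c.getD t 0 = o.getD t 0 + pvS o j N M t) →
      (((List.range M).reverse.foldl
          (fun c m => if c.getD m 0 = 0 then c else pvA_kloop b j m N 1 c) c).length = N ∧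
        ∀ t, ((List.range M).reverse.foldl
          (fun c m => if c.getD m 0 = 0 then c else pvA_kloop b j m N 1 c) c).getD t 0
            = o.getD t 0 + pvS o j N 0 t) := by
  intro M
  induction M with
  | zero =>
    intro c hcl hcv
    simp only [List.range_zero, List.reverse_nil, List.foldl_nil]
    exact ⟨hcl, hcv⟩
  | succ M ih =>
    intro c hcl hcv
    rw [List.range_succ, List.reverse_append]
    simp only [List.reverse_singleton, List.singleton_append, List.foldl_cons]
    have hSM : pvS o j N (M+1) M = 0 := by
      apply Finset.sum_eq_zero
      intro k _
      rw [if_neg]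
      rintro ⟨h1, h2, -⟩
      have : 1 * 1 ≤ k * j := Nat.mul_le_mul h1 hj
      omega
    have hcM : c.getD M 0 = o.getD M 0 := by rw [hcv M, hSM, add_zero]
    by_cases hz : c.getD M 0 = 0
    · rw [if_pos hz]
      apply ih c hcl
      intro t
      rw [hcv t, pvS_step o j N M t, ← add_assoc]
      rw [Finset.sum_eq_zero, add_zero]
      intro k _
      rw [← hcM, hz]
      simp
    · rw [if_neg hz]
      obtain ⟨L1, L2⟩ := pvA_kloop_getD b j M N hj 25 1 (by omega) c (le_refl 1) hcl
      apply ih _ L1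
      intro t
      rw [L2 t, hcv t, pvS_step o j N M t, hcM, ← add_assoc]
      congr 1
      refine Finset.sum_congr rfl (fun k' hk' => ?_)
      rw [hb k' (Finset.mem_range.mp hk')]

lemma pvA_jstep_rep (N j : Nat) (hj : 1 ≤ j) (c : List Int) (f : PowerSeries ℤ)
    (hc : pvRep c N f) :
    pvRep (pvA_jstep N j c) N (f * (1 - (PowerSeries.X : PowerSeries ℤ)^j)^24) := by
  obtain ⟨hcl, hcv⟩ := hc
  simp only [pvA_jstep, PySem.List.foldl_append_singleton_eq_map, List.nil_append]
  have hb : ∀ k, k < 25 →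
      ((List.range 25).map (fun k => ((Nat.choose 24 k : Int)) * (-1)^k)).getD k 0 = pvBC k := by
    intro k hk
    rw [PySem.List.getD_map_range _ _ _ _ hk, pvBC]
    ring
  have hinv : ∀ t, c.getD t 0 = c.getD t 0 + pvS c j N N t := by
    intro t
    simp only [pvS]
    rw [Finset.sum_eq_zero, add_zero]
    intro k _
    rw [if_neg]
    rintro ⟨h1, h2, h3⟩
    omega
  obtain ⟨L1, L2⟩ := pvA_mfold _ j N hj hb c N c hcl hinv
  refine ⟨L1, fun t ht => ?_⟩
  rw [L2 t, pv_coeff_mul_factor]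
  have e25 : (25 : ℕ) = 24 + 1 := rfl
  simp only [pvS]
  rw [e25, Finset.sum_range_succ' _ 24, Finset.sum_range_succ' _ 24]
  have hz : (if 1 ≤ 0 ∧ 0 + 0 * j ≤ t ∧ t < N then c.getD (t - 0*j) 0 * pvBC 0 else 0) = (0:Int) := by
    rw [if_neg]
    rintro ⟨h, -⟩
    omega
  have hz2 : (if 0 * j ≤ t then PowerSeries.coeff (t - 0*j) f * pvBC 0 else 0)
      = c.getD t 0 := by
    rw [if_pos (by omega), hcv t ht]
    simp [pvBC]
  have hmain : ∀ i ∈ Finset.range 24,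
      (if 1 ≤ i+1 ∧ 0 + (i+1) * j ≤ t ∧ t < N then c.getD (t - (i+1)*j) 0 * pvBC (i+1) else 0)
        = (if (i+1) * j ≤ t then PowerSeries.coeff (t - (i+1)*j) f * pvBC (i+1) else 0) := by
    intro i _
    by_cases hle : (i+1)*j ≤ t
    · rw [if_pos ⟨by omega, by omega, ht⟩, if_pos hle, hcv (t - (i+1)*j) (by omega)]
    · rw [if_neg, if_neg hle]
      rintro ⟨-, h2, -⟩
      omega
  rw [Finset.sum_congr rfl hmain, hz, hz2, add_zero]
  ring

lemma pv_lists_eq (J : Nat) (cA e24 : List Int) (S1 S2 : PowerSeries ℤ)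
    (hA : pvRep cA (J+1) S1) (hB : pvRep e24 (J+1) S2) (hS : S1 = S2) :
    (List.range' 1 J).map (fun n => cA.getD (n-1) 0) = e24.take J := by
  obtain ⟨hAl, hAv⟩ := hA
  obtain ⟨hBl, hBv⟩ := hB
  apply List.ext_getElem
  · simp [hBl]
  · intro i h1 h2
    have hiJ : i < J := by simpa using h1
    rw [List.getElem_map, List.getElem_take, List.getElem_range']
    have e1 : 1 + 1 * i - 1 = i := by omega
    rw [e1, hAv i (by omega), hS, ← hBv i (by omega),
      List.getD_eq_getElem e24 0 (by omega)]

lemma pvA_fold_rep (N : Nat) (J : Nat) (c : List Int) (f : PowerSeries ℤ) (hc : pvRep c N f) :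
    pvRep ((List.range' 1 J).foldl (fun coeffs j => pvA_jstep N j coeffs) c) N
      (f * (((List.range' 1 J).map (fun j => (1 - (PowerSeries.X : PowerSeries ℤ)^j))).prod)^24) := by
  induction J with
  | zero => simpa using hc
  | succ J ih =>
    rw [List.range'_1_concat, List.foldl_append, List.map_append, List.prod_append]
    simp only [List.foldl_cons, List.foldl_nil, List.map_cons, List.map_nil, List.prod_cons,
      List.prod_nil, mul_one]
    have h := pvA_jstep_rep N (1+J) (by omega) _ _ ih
    rw [mul_pow, ← mul_assoc]
    exact h

lemma pvB_fold_rep (N : Nat) (J : Nat) (c : List Int) (f : PowerSeries ℤ) (hc : pvRep c N f) :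
    pvRep ((List.range' 1 J).foldl (fun e j => pvB_etastep N j e) c) N
      (f * ((List.range' 1 J).map (fun j => (1 - (PowerSeries.X : PowerSeries ℤ)^j))).prod) := by
  induction J with
  | zero => simpa using hc
  | succ J ih =>
    rw [List.range'_1_concat, List.foldl_append, List.map_append, List.prod_append]
    simp only [List.foldl_cons, List.foldl_nil, List.map_cons, List.map_nil, List.prod_cons,
      List.prod_nil, mul_one]
    have h := pvB_etastep_rep N (1+J) _ _ ih
    rw [← mul_assoc]
    exact h

lemma pvB_chain (N : Nat) (eta : List Int) (E : PowerSeries ℤ) (h : pvRep eta N E) :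
    pvRep (pvB_tmul (pvB_tmul
        (pvB_tmul (pvB_tmul (pvB_tmul eta eta) (pvB_tmul eta eta))
          (pvB_tmul (pvB_tmul eta eta) (pvB_tmul eta eta)))
        (pvB_tmul (pvB_tmul (pvB_tmul eta eta) (pvB_tmul eta eta))
          (pvB_tmul (pvB_tmul eta eta) (pvB_tmul eta eta))))
      (pvB_tmul (pvB_tmul (pvB_tmul eta eta) (pvB_tmul eta eta))
        (pvB_tmul (pvB_tmul eta eta) (pvB_tmul eta eta)))) N (E^24) := by
  have h2 := pvB_tmul_rep _ _ _ _ _ h h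
  have h4 := pvB_tmul_rep _ _ _ _ _ h2 h2
  have h8 := pvB_tmul_rep _ _ _ _ _ h4 h4
  have h16 := pvB_tmul_rep _ _ _ _ _ h8 h8
  have h24 := pvB_tmul_rep _ _ _ _ _ h16 h8
  convert h24 using 2
  ring

lemma pv_tau_eq (x : Int) : pvA_tau x = pvB_tau x := by
  by_cases hx : x < 1
  · simp only [pvA_tau, pvB_tau, if_pos hx]
  · simp only [pvA_tau, pvB_tau]
    rw [if_neg hx, if_neg hx]
    simp only [Nat.add_sub_cancel]
    have hA := pvA_fold_rep (x.toNat + 1) x.toNat _ 1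
      (pvA_init_rep (x.toNat + 1) (by omega))
    have hEta := pvB_fold_rep (x.toNat + 1) x.toNat _ 1
      (pvB_init_rep (x.toNat + 1) (by omega))
    exact pv_lists_eq x.toNat _ _ _ _ hA (pvB_chain _ _ _ hEta) (by ring)

-- ===== VERDICT (by name: the statement is the Claim_ definition above) =====
theorem verify_tau_squared_multiplicativity_spec : Claim_equal_verify_tau_squared_multiplicativity := by
  intro nmax _
  unfold Spec_verify_tau_squared_multiplicativity
  unfold verify_tau_squared_multiplicativity verify_tau_squared_multiplicativity_alt
  rw [pv_tau_eq]
  simp only [PySem.List.foldl_append_if]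
  rw [PySem.List.foldl_append_eq_flatMap]
  simp
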